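-- pv_equiv track=rewrite | github.com/blinkerzkc4/pms | utils/nepali_nums.py | nepali_nums
-- ===== SOURCE A (Python) =====
-- to_nepali_hash = {
--     "0": "०",
--     "9": "९",
--     "8": "८",
--     "7": "७",
--     "6": "६",
--     "5": "५",
--     "4": "४",
--     "3": "३",
--     "2": "२",
--     "1": "१",
-- }
--
-- num_list = ["0", "1", "2", "9", "8", "7", "6", "5", "4", "3"]
--
-- def nepali_nums(num):
--     if not num:
--         return num
--     num = str(num)
--     if all([value not in num for value in num_list]):
--         return num
--     num_arr = [to_nepali_hash.get(value, value) for value in list(num)]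
--     return "".join(num_arr)
-- ===== SOURCE B (Python) =====
-- def nepali_nums(num):
--     if not num:
--         return num
--     num = str(num)
--     for a, n in zip("0123456789", "०१२३४५६७८९"):
--         num = num.replace(a, n)
--     return num
-- ===== Notes on version B (the rewrite author's own statement) =====
-- stated objective: simpler
-- what changed: Replaced the per-character dict-lookup comprehension (plus the redundant all(...) pre-check, which is dropped) by a loop of ten str.replace passes, one per digit; order is irrelevant because Nepali digits never overlap ASCII digits.
import Mathlib
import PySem

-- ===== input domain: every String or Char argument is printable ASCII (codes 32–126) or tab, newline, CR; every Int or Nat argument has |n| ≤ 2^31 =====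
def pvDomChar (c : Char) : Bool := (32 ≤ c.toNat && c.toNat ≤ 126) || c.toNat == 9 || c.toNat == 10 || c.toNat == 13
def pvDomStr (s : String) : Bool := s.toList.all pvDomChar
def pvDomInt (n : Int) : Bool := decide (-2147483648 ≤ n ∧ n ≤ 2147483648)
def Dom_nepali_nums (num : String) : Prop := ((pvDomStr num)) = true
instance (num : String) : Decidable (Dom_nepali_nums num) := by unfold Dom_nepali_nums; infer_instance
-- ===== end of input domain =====

-- B drops the redundant all(...) pre-check and replaces the per-char dict lookup by a
-- loop of ten str.replace passes (objective: simpler; not faster).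

-- ===== PORT A =====
def pvToNepaliHash : PySem.Dict String String := PySem.Dict.ofList
  [("0", "०"), ("9", "९"), ("8", "८"), ("7", "७"), ("6", "६"),
   ("5", "५"), ("4", "४"), ("3", "३"), ("2", "२"), ("1", "१")]

def pvNumList : List String := ["0", "1", "2", "9", "8", "7", "6", "5", "4", "3"]

def nepali_nums (num : String) : String :=
  if num = "" then num
  else if (pvNumList.map (fun v => !(PySem.Str.isIn v num))).all (fun b => b) then num
  else PySem.Str.join "" (num.toList.map (fun c =>
    pvToNepaliHash.getD (String.ofList [c]) (String.ofList [c])))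

-- ===== PORT B =====
def nepali_nums_alt (num : String) : String :=
  if num = "" then num
  else (List.zip "0123456789".toList "०१२३४५६७८९".toList).foldl
    (fun s (p : Char × Char) => PySem.Str.replace s (String.ofList [p.1]) (String.ofList [p.2])) num

-- ===== PRECONDITION & SPEC =====
def Spec_nepali_nums (num : String) (out : String) : Prop := out = nepali_nums_alt num
instance (num : String) (out : String) : Decidable (Spec_nepali_nums num out) := by unfold Spec_nepali_nums; infer_instance

-- ===== CLAIM (what is proved, stated in full; the proofs are below) =====
def Claim_equal_nepali_nums : Prop := ∀ (num : String), Dom_nepali_nums num → Spec_nepali_nums num (nepali_nums num)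

-- ===== LEMMAS AND PROOFS =====

-- the single substitution performed by one replace pass
def pvStep (a b c : Char) : Char := if a = c then b else c

-- the per-char substitution both programs compute
def pvG (c : Char) : Char :=
  if '0' = c then '०' else if '1' = c then '१' else if '2' = c then '२' else
  if '3' = c then '३' else if '4' = c then '४' else if '5' = c then '५' else
  if '6' = c then '६' else if '7' = c then '७' else if '8' = c then '८' else
  if '9' = c then '९' else c

theorem pv_go_single (a b : Char) : ∀ (l : List Char) (fuel : Nat) (acc : List Char),
    l.length ≤ fuel →
    PySem.Chars.replace.go [a] [b] fuel l acc = acc.reverse ++ l.map (pvStep a b) := by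
  intro l
  induction l with
  | nil =>
    intro fuel acc _
    cases fuel with
    | zero => rw [PySem.Chars.replace.go]; simp
    | succ k => rw [PySem.Chars.replace.go]; simp; omega
  | cons c t ih =>
    intro fuel acc hf
    cases fuel with
    | zero => simp at hf
    | succ k =>
      have hf' : t.length ≤ k := by simp only [List.length_cons] at hf; omega
      rw [PySem.Chars.replace.go]
      simp only [List.isPrefixOf, Bool.and_true, beq_iff_eq]
      by_cases h : a = c
      · rw [if_pos h]
        simp only [List.length_cons, List.length_nil, Nat.zero_add, List.drop_succ_cons,
          List.drop_zero, List.reverse_singleton]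
        rw [ih k ([b] ++ acc) hf']
        simp [pvStep, h]
      · rw [if_neg h]
        rw [ih k (c :: acc) hf']
        simp [pvStep, h]

theorem pv_replace_single (a b : Char) (cs : List Char) :
    PySem.Chars.replace cs [a] [b] = cs.map (pvStep a b) := by
  rw [PySem.Chars.replace]
  simp only [List.isEmpty_cons, if_neg Bool.false_ne_true]
  rw [pv_go_single a b cs cs.length [] (le_refl _)]
  simp

theorem pv_composed_eq_pvG :
    (pvStep '9' '९' ∘ (pvStep '8' '८' ∘ (pvStep '7' '७' ∘ (pvStep '6' '६' ∘
      (pvStep '5' '५' ∘ (pvStep '4' '४' ∘ (pvStep '3' '३' ∘ (pvStep '2' '२' ∘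
      (pvStep '1' '१' ∘ pvStep '0' '०'))))))))) = pvG := by
  funext c
  simp only [Function.comp_apply]
  by_cases h0 : c = '0'; · subst h0; decide
  by_cases h1 : c = '1'; · subst h1; decide
  by_cases h2 : c = '2'; · subst h2; decide
  by_cases h3 : c = '3'; · subst h3; decide
  by_cases h4 : c = '4'; · subst h4; decide
  by_cases h5 : c = '5'; · subst h5; decide
  by_cases h6 : c = '6'; · subst h6; decide
  by_cases h7 : c = '7'; · subst h7; decide
  by_cases h8 : c = '8'; · subst h8; decide
  by_cases h9 : c = '9'; · subst h9; decide
  simp [pvStep, pvG, Ne.symm h0, Ne.symm h1, Ne.symm h2, Ne.symm h3, Ne.symm h4,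
    Ne.symm h5, Ne.symm h6, Ne.symm h7, Ne.symm h8, Ne.symm h9]

theorem pv_alt_eq (num : String) (h : num ≠ "") :
    nepali_nums_alt num = String.ofList (num.toList.map pvG) := by
  rw [nepali_nums_alt, if_neg h]
  have hz : List.zip "0123456789".toList "०१२३४५६७८९".toList =
      [('0','०'),('1','१'),('2','२'),('3','३'),('4','४'),('5','५'),('6','६'),('7','७'),('8','८'),('9','९')] := by decide
  rw [hz]
  simp only [List.foldl_cons, List.foldl_nil, PySem.Str.replace, String.toList_ofList,
    pv_replace_single, List.map_map]
  rw [pv_composed_eq_pvG]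

theorem pv_getD_eq (c : Char) :
    pvToNepaliHash.getD (String.ofList [c]) (String.ofList [c]) = String.ofList [pvG c] := by
  by_cases h0 : c = '0'; · subst h0; decide
  by_cases h1 : c = '1'; · subst h1; decide
  by_cases h2 : c = '2'; · subst h2; decide
  by_cases h3 : c = '3'; · subst h3; decide
  by_cases h4 : c = '4'; · subst h4; decide
  by_cases h5 : c = '5'; · subst h5; decide
  by_cases h6 : c = '6'; · subst h6; decide
  by_cases h7 : c = '7'; · subst h7; decide
  by_cases h8 : c = '8'; · subst h8; decide
  by_cases h9 : c = '9'; · subst h9; decide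
  have hg : pvG c = c := by
    simp [pvG, Ne.symm h0, Ne.symm h1, Ne.symm h2, Ne.symm h3, Ne.symm h4,
      Ne.symm h5, Ne.symm h6, Ne.symm h7, Ne.symm h8, Ne.symm h9]
  rw [hg]
  have hk : ∀ d : Char, c ≠ d → (String.ofList [d] == String.ofList [c]) = false := by
    intro d hd
    simp only [beq_eq_false_iff_ne, ne_eq]
    intro he
    exact hd (by simpa using congrArg String.toList he.symm)
  apply PySem.Dict.getD_of_not_contains
  have e : pvToNepaliHash = PySem.Dict.mk
      [("0", "०"), ("9", "९"), ("8", "८"), ("7", "७"), ("6", "६"),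
       ("5", "५"), ("4", "४"), ("3", "३"), ("2", "२"), ("1", "१")] := rfl
  rw [e, PySem.Dict.contains_mk]
  simp only [List.any_cons, List.any_nil, Bool.or_false, Bool.or_eq_false_iff]
  refine ⟨?_, ?_, ?_, ?_, ?_, ?_, ?_, ?_, ?_, ?_⟩ <;>
    · simp only [beq_eq_false_iff_ne, ne_eq]
      intro he
      have ht := congrArg String.toList he
      simp only [String.toList_ofList] at ht
      first
      | exact h0 (by simpa using (congrArg (fun l => l.headD ' ') ht).symm)
      | exact h1 (by simpa using (congrArg (fun l => l.headD ' ') ht).symm)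
      | exact h2 (by simpa using (congrArg (fun l => l.headD ' ') ht).symm)
      | exact h3 (by simpa using (congrArg (fun l => l.headD ' ') ht).symm)
      | exact h4 (by simpa using (congrArg (fun l => l.headD ' ') ht).symm)
      | exact h5 (by simpa using (congrArg (fun l => l.headD ' ') ht).symm)
      | exact h6 (by simpa using (congrArg (fun l => l.headD ' ') ht).symm)
      | exact h7 (by simpa using (congrArg (fun l => l.headD ' ') ht).symm)
      | exact h8 (by simpa using (congrArg (fun l => l.headD ' ') ht).symm)
      | exact h9 (by simpa using (congrArg (fun l => l.headD ' ') ht).symm)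

theorem pv_not_mem_of_isIn_false (d : Char) (s : String) (v : String) (hv : v.toList = [d])
    (h : PySem.Str.isIn v s = false) : d ∉ s.toList := by
  intro hm
  have : PySem.Str.isIn v s = true := by
    rw [PySem.Str.isIn_iff_infix, hv]
    exact (List.singleton_infix_iff d s.toList).mpr hm
  rw [this] at h
  simp at h

-- ===== VERDICT (by name: the statement is the Claim_ definition above) =====
theorem nepali_nums_spec : Claim_equal_nepali_nums := by
  intro num _
  unfold Spec_nepali_nums
  by_cases he : num = ""
  · simp [nepali_nums, nepali_nums_alt, he]
  rw [pv_alt_eq num he, nepali_nums, if_neg he]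
  by_cases hall : ((pvNumList.map (fun v => !(PySem.Str.isIn v num))).all (fun b => b)) = true
  · rw [if_pos hall]
    have hd : ∀ v ∈ pvNumList, PySem.Str.isIn v num = false := by
      intro v hv
      have := List.all_eq_true.mp hall
      have h2 := this _ (List.mem_map_of_mem hv)
      simpa using h2
    have hng : ∀ c ∈ num.toList, pvG c = c := by
      intro c hc
      have n0 := pv_not_mem_of_isIn_false '0' num "0" (by decide) (hd _ (by decide))
      have n1 := pv_not_mem_of_isIn_false '1' num "1" (by decide) (hd _ (by decide))
      have n2 := pv_not_mem_of_isIn_false '2' num "2" (by decide) (hd _ (by decide))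
      have n3 := pv_not_mem_of_isIn_false '3' num "3" (by decide) (hd _ (by decide))
      have n4 := pv_not_mem_of_isIn_false '4' num "4" (by decide) (hd _ (by decide))
      have n5 := pv_not_mem_of_isIn_false '5' num "5" (by decide) (hd _ (by decide))
      have n6 := pv_not_mem_of_isIn_false '6' num "6" (by decide) (hd _ (by decide))
      have n7 := pv_not_mem_of_isIn_false '7' num "7" (by decide) (hd _ (by decide))
      have n8 := pv_not_mem_of_isIn_false '8' num "8" (by decide) (hd _ (by decide))
      have n9 := pv_not_mem_of_isIn_false '9' num "9" (by decide) (hd _ (by decide))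
      have g0 : '0' ≠ c := fun h => n0 (h ▸ hc)
      have g1 : '1' ≠ c := fun h => n1 (h ▸ hc)
      have g2 : '2' ≠ c := fun h => n2 (h ▸ hc)
      have g3 : '3' ≠ c := fun h => n3 (h ▸ hc)
      have g4 : '4' ≠ c := fun h => n4 (h ▸ hc)
      have g5 : '5' ≠ c := fun h => n5 (h ▸ hc)
      have g6 : '6' ≠ c := fun h => n6 (h ▸ hc)
      have g7 : '7' ≠ c := fun h => n7 (h ▸ hc)
      have g8 : '8' ≠ c := fun h => n8 (h ▸ hc)
      have g9 : '9' ≠ c := fun h => n9 (h ▸ hc)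
      simp [pvG, g0, g1, g2, g3, g4, g5, g6, g7, g8, g9]
    rw [List.map_congr_left hng, List.map_id', String.ofList_toList]
  · rw [if_neg hall]
    rw [List.map_congr_left (fun c (_ : c ∈ num.toList) => pv_getD_eq c)]
    rw [PySem.Str.join]
    have : (num.toList.map fun c => String.ofList [pvG c]).map String.toList
        = (num.toList.map pvG).map (fun d => [d]) := by
      simp [List.map_map, Function.comp]
    rw [this]
    have hsep : ("" : String).toList = [] := by decide
    rw [hsep, PySem.Chars.join_nil_singletons]
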